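-- pv_equiv track=rewrite | github.com/Sairamesh45/Ai-Summarizer | app/services/ocr_service.py | _clean
-- ===== SOURCE A (Python) =====
-- def _clean(raw: str) -> str:
--     """
--     Normalise raw Tesseract output:
--
--     1. Normalise line endings
--     2. Strip each line
--     3. Drop lines that are pure noise (≤ 1 alphanumeric char and < 4 chars total)
--     4. Collapse runs of more than 2 consecutive blank lines → single blank line
--     5. Strip the whole block
--     """
--     lines = raw.replace("\r\n", "\n").replace("\r", "\n").split("\n")
--
--     cleaned: list[str] = []
--     blank_run = 0
--
--     for line in lines:
--         stripped = line.strip()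
--
--         if not stripped:
--             blank_run += 1
--             # Allow at most one blank line between paragraphs
--             if blank_run <= 1:
--                 cleaned.append("")
--             continue
--
--         blank_run = 0
--
--         # Discard lines that are effectively noise
--         alphanumeric = sum(1 for c in stripped if c.isalnum())
--         if alphanumeric < 2 and len(stripped) < 4:
--             continue
--
--         cleaned.append(stripped)
--
--     return "\n".join(cleaned).strip()
-- ===== SOURCE B (Python) =====
-- def _clean(raw: str) -> str:
--     # Run-based two-stage pass: strip all lines, then walk maximal blank /
--     # non-blank runs; each blank run emits one "", each non-blank run emits
--     # its lines that pass the noise filter.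
--     stripped = [l.strip() for l in raw.replace("\r\n", "\n").replace("\r", "\n").split("\n")]
--     out: list[str] = []
--     i = 0
--     n = len(stripped)
--     while i < n:
--         if not stripped[i]:
--             out.append("")
--             while i < n and not stripped[i]:
--                 i += 1
--         else:
--             j = i
--             while j < n and stripped[j]:
--                 j += 1
--             out.extend(s for s in stripped[i:j]
--                        if sum(1 for c in s if c.isalnum()) >= 2 or len(s) >= 4)
--             i = j
--     return "\n".join(out).strip()
-- ===== Notes on version B (the rewrite author's own statement) =====
-- stated objective: idiomatic
-- what changed: A's stateful single pass with a blank_run counter is replaced by a run-based traversal: strip all lines first, then walk maximal blank/non-blank runs, emitting one empty line per blank run and the noise-filtered lines of each non-blank run.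
import Mathlib
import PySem

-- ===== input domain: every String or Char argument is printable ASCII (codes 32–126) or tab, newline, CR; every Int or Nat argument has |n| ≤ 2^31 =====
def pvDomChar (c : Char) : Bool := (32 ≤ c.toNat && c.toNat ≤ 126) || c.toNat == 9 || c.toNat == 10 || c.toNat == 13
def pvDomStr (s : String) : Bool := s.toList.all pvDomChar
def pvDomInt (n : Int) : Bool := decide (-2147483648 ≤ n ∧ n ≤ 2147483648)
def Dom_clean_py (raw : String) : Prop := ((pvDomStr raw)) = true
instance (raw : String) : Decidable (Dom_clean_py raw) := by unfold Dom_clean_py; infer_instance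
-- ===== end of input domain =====

-- B replaces A's stateful blank_run-counter single pass by a run-based traversal
-- (maximal blank / non-blank runs; one "" per blank run, noise filter per
-- non-blank run); objective: idiomatic/alternative decomposition, same cost.

-- ===== PORT A =====

-- sum(1 for c in s if c.isalnum())
def pvAlnum (s : String) : Int :=
  ((s.toList.filter (fun c => PySem.Chars.isalnum c)).map (fun _ => (1 : Int))).sum

-- raw.replace("\r\n","\n").replace("\r","\n").split("\n")  (shared by both Pythons verbatim)
def pvLines (raw : String) : List String :=
  (PySem.Str.split? (PySem.Str.replace (PySem.Str.replace raw "\r\n" "\n") "\r" "\n") "\n").getD []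

-- one iteration of A's for-loop; state = (cleaned, blank_run)
def pvStepA (st : List String × Int) (line : String) : List String × Int :=
  let stripped := PySem.Str.strip line
  if stripped = "" then
    let br := st.2 + 1
    (if br ≤ 1 then st.1 ++ [""] else st.1, br)
  else
    if pvAlnum stripped < 2 ∧ PySem.Str.len stripped < 4 then (st.1, 0)
    else (st.1 ++ [stripped], 0)

def clean_py (raw : String) : String :=
  let cleaned := ((pvLines raw).foldl pvStepA ([], 0)).1
  PySem.Str.strip (PySem.Str.join "\n" cleaned)

-- ===== PORT B =====

-- truthiness test 'not stripped[i]' on a str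
def pvBlank (t : String) : Bool := t == ""

-- sum(1 for c in s if c.isalnum()) >= 2 or len(s) >= 4
def pvKeepB (s : String) : Bool :=
  decide (2 ≤ pvAlnum s ∨ 4 ≤ PySem.Str.len s)

-- B's while-loop over the stripped lines: a blank run emits one "", a
-- non-blank run emits its lines passing the noise filter.
def pvRuns : List String → List String
  | [] => []
  | s :: rest =>
    if pvBlank s then
      "" :: pvRuns (rest.dropWhile pvBlank)
    else
      ((s :: rest.takeWhile (fun t => !pvBlank t)).filter pvKeepB) ++
        pvRuns (rest.dropWhile (fun t => !pvBlank t))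
termination_by l => l.length
decreasing_by
  · exact Nat.lt_succ_of_le (List.length_dropWhile_le _ _)
  · exact Nat.lt_succ_of_le (List.length_dropWhile_le _ _)

def clean_py_alt (raw : String) : String :=
  let stripped := (pvLines raw).map PySem.Str.strip
  PySem.Str.strip (PySem.Str.join "\n" (pvRuns stripped))

-- ===== PRECONDITION & SPEC =====
def Spec_clean_py (raw : String) (out : String) : Prop := out = clean_py_alt raw
instance (raw : String) (out : String) : Decidable (Spec_clean_py raw out) := by unfold Spec_clean_py; infer_instance

-- ===== CLAIM (what is proved, stated in full; the proofs are below) =====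
def Claim_equal_clean_py : Prop := ∀ (raw : String), Dom_clean_py raw → Spec_clean_py raw (clean_py raw)

-- ===== LEMMAS AND PROOFS =====

lemma pvRuns_nil : pvRuns [] = [] := by
  rw [pvRuns.eq_def]

lemma pvRuns_cons_blank (xs : List String) :
    pvRuns ("" :: xs) = "" :: pvRuns (xs.dropWhile pvBlank) := by
  rw [pvRuns.eq_def]; simp [pvBlank]

lemma pvRuns_cons_of_nonblank (s : String) (xs : List String) (hs : s ≠ "") :
    pvRuns (s :: xs) =
      ((s :: xs.takeWhile (fun t => !pvBlank t)).filter pvKeepB) ++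
        pvRuns (xs.dropWhile (fun t => !pvBlank t)) := by
  rw [pvRuns.eq_def]; simp [pvBlank, hs]

-- peeling a single non-blank line off a run
lemma pvRuns_cons_nonblank (s : String) (xs : List String) (hs : s ≠ "") :
    pvRuns (s :: xs) = (if pvKeepB s then [s] else []) ++ pvRuns xs := by
  match xs with
  | [] =>
    rw [pvRuns_cons_of_nonblank s [] hs]
    simp only [List.takeWhile_nil, List.dropWhile_nil, pvRuns_nil, List.filter_cons]
    cases pvKeepB s <;> simp
  | y :: ys =>
    by_cases hy : y = ""
    · subst hy
      rw [pvRuns_cons_of_nonblank s _ hs]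
      simp only [List.takeWhile_cons, List.dropWhile_cons, pvBlank,
        BEq.rfl, Bool.not_true, Bool.false_eq_true, if_false]
      rw [List.filter_cons]
      cases pvKeepB s <;> simp
    · have hby : pvBlank y = false := by simp [pvBlank, hy]
      rw [pvRuns_cons_of_nonblank s _ hs, pvRuns_cons_of_nonblank y ys hy]
      simp only [List.takeWhile_cons, List.dropWhile_cons, hby,
        Bool.not_false, if_true]
      rw [List.filter_cons]
      cases pvKeepB s <;> simp

-- loop invariant: A's fold from state (acc, br) produces acc ++ B's runs of the
-- remaining stripped lines (with a leading blank run skipped when br ≥ 1)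
lemma foldA_eq (lines : List String) :
    ∀ (acc : List String) (br : Int), 0 ≤ br →
      (lines.foldl pvStepA (acc, br)).1 =
        acc ++ pvRuns (if br ≤ 0 then lines.map PySem.Str.strip
                       else (lines.map PySem.Str.strip).dropWhile pvBlank) := by
  induction lines with
  | nil =>
    intro acc br _
    simp only [List.foldl_nil, List.map_nil, List.dropWhile_nil, ite_self,
      pvRuns_nil, List.append_nil]
  | cons l ls ih =>
    intro acc br hbr
    simp only [List.foldl_cons, List.map_cons]
    by_cases hb : PySem.Str.strip l = ""
    · have hbl : pvBlank (PySem.Str.strip l) = true := by simp [pvBlank, hb]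
      by_cases h0 : br ≤ 0
      · have hstep : pvStepA (acc, br) l = (acc ++ [""], br + 1) := by
          simp only [pvStepA]
          rw [if_pos hb, if_pos (by omega : br + 1 ≤ 1)]
        rw [hstep, ih _ (br + 1) (by omega),
          if_neg (by omega : ¬ br + 1 ≤ 0), if_pos h0]
        rw [hb, pvRuns_cons_blank]
        simp
      · have hstep : pvStepA (acc, br) l = (acc, br + 1) := by
          simp only [pvStepA]
          rw [if_pos hb, if_neg (by omega : ¬ br + 1 ≤ 1)]
        rw [hstep, ih _ (br + 1) (by omega),
          if_neg (by omega : ¬ br + 1 ≤ 0), if_neg h0,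
          List.dropWhile_cons_of_pos hbl]
    · have hbl : pvBlank (PySem.Str.strip l) = false := by simp [pvBlank, hb]
      have hrw : (if br ≤ 0 then PySem.Str.strip l :: ls.map PySem.Str.strip
            else (PySem.Str.strip l :: ls.map PySem.Str.strip).dropWhile pvBlank) =
          PySem.Str.strip l :: ls.map PySem.Str.strip := by
        split
        · rfl
        · rw [List.dropWhile_cons_of_neg (by simp [hbl])]
      rw [hrw, pvRuns_cons_nonblank _ _ hb]
      by_cases hn : pvAlnum (PySem.Str.strip l) < 2 ∧ PySem.Str.len (PySem.Str.strip l) < 4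
      · have hstep : pvStepA (acc, br) l = (acc, 0) := by
          simp only [pvStepA]
          rw [if_neg hb, if_pos hn]
        have hkeep : pvKeepB (PySem.Str.strip l) = false := by
          simp only [pvKeepB, decide_eq_false_iff_not]
          omega
        rw [hstep, ih _ 0 le_rfl, if_pos le_rfl, hkeep]
        simp
      · have hstep : pvStepA (acc, br) l = (acc ++ [PySem.Str.strip l], 0) := by
          simp only [pvStepA]
          rw [if_neg hb, if_neg hn]
        have hkeep : pvKeepB (PySem.Str.strip l) = true := by
          simp only [pvKeepB, decide_eq_true_eq]
          omega
        rw [hstep, ih _ 0 le_rfl, if_pos le_rfl, hkeep]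
        simp

-- ===== VERDICT (by name: the statement is the Claim_ definition above) =====
theorem clean_py_spec : Claim_equal_clean_py := by
  intro raw _
  unfold Spec_clean_py clean_py clean_py_alt
  rw [foldA_eq (pvLines raw) [] 0 le_rfl, if_pos le_rfl]
  simp only [List.nil_append]
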